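-- pv_equiv track=rewrite | github.com/yousaf530/BattleShip-Game | battleship.py | check_boat
-- ===== SOURCE A (Python) =====
-- def check_boatinboard(boat, taken):
--     boat.sort()
--     for i in range(len(boat)):
--         num = boat[i]
--         if num in taken:
--             boat = [-1]
--             break
--         elif num < 0 or num > 99:
--             boat = [-1]
--             break
--         elif num % 10 == 9 and i < len(boat) - 1:
--             if boat[i+1] % 10 == 0:
--                 boat = [-1]
--                 break
--         if i != 0:
--             if boat[i] != boat[i-1] + 1 and boat[i] != boat[i-1] + 10:
--                 boat = [-1]
--                 break
--     return boat
--
-- def check_boat(boatsize, start, direction, taken):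
--     boat = []
--     if direction == 1:  # ! Upward Direction
--         for i in range(boatsize):
--             boat.append(start - (i*10))
--             boat = check_boatinboard(boat, taken)
--     elif direction == 2:  # ! L to R Direction
--         for i in range(boatsize):
--             boat.append(start + i)
--             boat = check_boatinboard(boat, taken)
--     elif direction == 3:  # ! Downward Direction
--         for i in range(boatsize):
--             boat.append(start + (i*10))
--             boat = check_boatinboard(boat, taken)
--     elif direction == 4:  # ! R to L Direction
--         for i in range(boatsize):
--             boat.append(start - i)
--             boat = check_boatinboard(boat, taken)
--     return boat
-- ===== SOURCE B (Python) =====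
-- def check_boat(boatsize, start, direction, taken):
--     steps = {1: -10, 2: 1, 3: 10, 4: -1}
--     if direction not in steps:
--         return []
--     step = steps[direction]
--     cells = sorted(start + step * i for i in range(boatsize))
--     for j, c in enumerate(cells):
--         if c < 0 or c > 99 or c in taken:
--             return [-1]
--         if c % 10 == 9 and j + 1 < len(cells) and cells[j + 1] % 10 == 0:
--             return [-1]
--     return cells
-- ===== Notes on version B (the rewrite author's own statement) =====
-- stated objective: simpler
-- what changed: A rebuilds and re-validates a growing boat list by calling a sort-and-rescan helper after every single append (O(n^2 log n) with an absorbing [-1] state); B computes all cells from a direction-to-step map in one shot, sorts once, and makes a single linear scan for out-of-range, taken, or row-wrap cells.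
import Mathlib
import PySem

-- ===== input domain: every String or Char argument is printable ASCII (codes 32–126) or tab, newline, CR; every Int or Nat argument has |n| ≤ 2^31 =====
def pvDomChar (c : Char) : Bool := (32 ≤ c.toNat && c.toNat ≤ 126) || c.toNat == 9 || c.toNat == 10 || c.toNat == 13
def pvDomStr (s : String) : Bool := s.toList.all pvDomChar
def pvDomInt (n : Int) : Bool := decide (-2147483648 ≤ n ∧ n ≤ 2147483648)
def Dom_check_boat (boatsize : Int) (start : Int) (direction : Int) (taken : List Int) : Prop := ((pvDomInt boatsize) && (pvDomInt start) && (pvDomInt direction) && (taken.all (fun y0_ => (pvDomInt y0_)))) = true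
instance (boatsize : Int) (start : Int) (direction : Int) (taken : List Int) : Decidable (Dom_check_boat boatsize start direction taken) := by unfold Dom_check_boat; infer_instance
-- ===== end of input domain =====

-- B replaces A's append-then-(sort-and-rescan)-after-every-cell scheme by one direct
-- cell computation from a direction→step map, a single sort and a single linear scan (objective: simpler).
-- A mutates its local list via boat.sort(); the equivalence proved here is about the return value.

-- ===== PORT A =====
-- the for-i-in-range(len(boat)) loop of check_boatinboard, with `break` = returning [-1]
def cbbLoop (taken : List Int) (b : List Int) (i : Nat) : List Int :=
  if _h : i < b.length then
    if taken.contains (b.getD i 0) then [-1]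
    else if b.getD i 0 < 0 || b.getD i 0 > 99 then [-1]
    else if (PySem.Int.mod (b.getD i 0) 10 == 9) && (decide (i + 1 < b.length)) && (PySem.Int.mod (b.getD (i+1) 0) 10 == 0) then [-1]
    else if (i != 0) && !(b.getD i 0 == b.getD (i-1) 0 + 1) && !(b.getD i 0 == b.getD (i-1) 0 + 10) then [-1]
    else cbbLoop taken b (i+1)
  else b
termination_by b.length - i

def check_boatinboard (boat : List Int) (taken : List Int) : List Int :=
  cbbLoop taken (PySem.List.sorted boat (fun x => x) false) 0

-- the four direction loops of A differ only in the appended expression start + st*i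
def aLoop (taken : List Int) (start st : Int) (n : Nat) : List Int :=
  (List.range n).foldl (fun b (i : Nat) => check_boatinboard (b ++ [start + st * (i : Int)]) taken) []

def check_boat (boatsize : Int) (start : Int) (direction : Int) (taken : List Int) : List Int :=
  if direction = 1 then aLoop taken start (-10) boatsize.toNat
  else if direction = 2 then aLoop taken start 1 boatsize.toNat
  else if direction = 3 then aLoop taken start 10 boatsize.toNat
  else if direction = 4 then aLoop taken start (-1) boatsize.toNat
  else []

-- ===== PORT B =====
-- single scan over the sorted cells, with one-element lookahead for the row-wrap test
-- (wrapNext rest = "j+1 < len(cells) and cells[j+1] % 10 == 0" of Source B)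
def wrapNext : List Int → Bool
  | [] => false
  | d :: _ => PySem.Int.mod d 10 == 0

def altScan (taken : List Int) : List Int → Bool
  | [] => false
  | c :: rest =>
    if c < 0 || c > 99 || taken.contains c then true
    else if (PySem.Int.mod c 10 == 9) && wrapNext rest then true
    else altScan taken rest

-- shared tail of B after the direction→step lookup
def altGo (boatsize : Int) (start : Int) (st : Int) (taken : List Int) : List Int :=
  let cells := PySem.List.sorted ((List.range boatsize.toNat).map (fun (i : Nat) => start + st * (i : Int))) (fun x => x) false
  if altScan taken cells then [-1] else cells

def check_boat_alt (boatsize : Int) (start : Int) (direction : Int) (taken : List Int) : List Int :=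
  if direction = 1 then altGo boatsize start (-10) taken
  else if direction = 2 then altGo boatsize start 1 taken
  else if direction = 3 then altGo boatsize start 10 taken
  else if direction = 4 then altGo boatsize start (-1) taken
  else []

-- ===== PRECONDITION & SPEC =====
def Spec_check_boat (boatsize : Int) (start : Int) (direction : Int) (taken : List Int) (out : List Int) : Prop := out = check_boat_alt boatsize start direction taken
instance (boatsize : Int) (start : Int) (direction : Int) (taken : List Int) (out : List Int) : Decidable (Spec_check_boat boatsize start direction taken out) := by unfold Spec_check_boat; infer_instance

-- ===== CLAIM (what is proved, stated in full; the proofs are below) =====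
def Claim_equal_check_boat : Prop := ∀ (boatsize : Int) (start : Int) (direction : Int) (taken : List Int), Dom_check_boat boatsize start direction taken → Spec_check_boat boatsize start direction taken (check_boat boatsize start direction taken)

-- ===== LEMMAS AND PROOFS =====

-- an ascending arithmetic progression
def asc (a d : Int) (k : Nat) : List Int := (List.range k).map (fun (i : Nat) => a + d * (i : Int))

theorem asc_length (a d : Int) (k : Nat) : (asc a d k).length = k := by simp [asc]

theorem asc_getElem (a d : Int) (k : Nat) (j : Nat) (hj : j < k) :
    (asc a d k)[j]'(by rw [asc_length]; exact hj) = a + d * j := by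
  unfold asc
  rw [List.getElem_map, List.getElem_range]

theorem asc_succ_append (a d : Int) (k : Nat) : asc a d (k+1) = asc a d k ++ [a + d * k] := by
  simp [asc, List.range_succ]

theorem asc_succ_cons (a d : Int) (k : Nat) : asc a d (k+1) = a :: asc (a + d) d k := by
  apply List.ext_getElem
  · simp [asc_length]
  · intro j h1 h2
    match j with
    | 0 => rw [asc_getElem a d (k+1) 0 (by omega)]; simp [List.getElem_cons_zero]
    | j+1 =>
      rw [asc_getElem a d (k+1) (j+1) (by rw [asc_length] at h1; omega)]
      rw [List.getElem_cons_succ]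
      rw [asc_getElem (a+d) d k j (by simp [asc_length] at h2; omega)]
      push_cast
      ring

theorem asc_pairwise (a d : Int) (hd : 0 < d) (k : Nat) : (asc a d k).Pairwise (· < ·) := by
  unfold asc
  rw [List.pairwise_map]
  apply List.Pairwise.imp ?_ (List.pairwise_lt_range)
  intro i j hij
  have hij' : (i : Int) < (j : Int) := by exact_mod_cast hij
  have := mul_lt_mul_of_pos_left hij' hd
  linarith

theorem asc_diff (a d : Int) (k : Nat) (j : Nat) (hj : j + 1 < k) :
    (asc a d k).getD (j+1) 0 = (asc a d k).getD j 0 + d := by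
  rw [List.getD_eq_getElem _ _ (by rw [asc_length]; omega),
      List.getD_eq_getElem _ _ (by rw [asc_length]; omega)]
  rw [asc_getElem a d k (j+1) (by omega), asc_getElem a d k j (by omega)]
  push_cast
  ring

-- core: on a list with constant adjacent step d ∈ {1,10}, A's index loop is B's single scan
theorem adj_false (s : List Int) (d : Int) (hd : d = 1 ∨ d = 10)
    (hstep : ∀ j, j + 1 < s.length → s.getD (j+1) 0 = s.getD j 0 + d)
    (i : Nat) (hi : i < s.length) :
    ((i != 0) && !(s.getD i 0 == s.getD (i-1) 0 + 1) && !(s.getD i 0 == s.getD (i-1) 0 + 10)) = false := by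
  rcases Nat.eq_zero_or_pos i with rfl | h0
  · simp
  · have hs := hstep (i-1) (by omega)
    rw [Nat.sub_add_cancel h0] at hs
    simp only [List.getD_eq_getElem?_getD] at hs
    rcases hd with rfl | rfl <;> simp [hs]

-- core: on a list with constant adjacent step d ∈ {1,10}, A's index loop is B's single scan
theorem cbb_core (taken : List Int) (s : List Int) (d : Int) (hd : d = 1 ∨ d = 10)
    (hstep : ∀ j, j + 1 < s.length → s.getD (j+1) 0 = s.getD j 0 + d) :
    ∀ i, cbbLoop taken s i = if altScan taken (s.drop i) then [-1] else s := by
  have main : ∀ m i, s.length - i ≤ m →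
      cbbLoop taken s i = if altScan taken (s.drop i) then [-1] else s := by
    intro m
    induction m with
    | zero =>
      intro i h
      rw [cbbLoop, dif_neg (by omega)]
      rw [List.drop_eq_nil_of_le (by omega)]
      simp [altScan]
    | succ m ih =>
      intro i h
      by_cases hi : i < s.length
      · rw [cbbLoop, dif_pos hi]
        have hdrop : s.drop i = s[i] :: s.drop (i+1) := List.drop_eq_getElem_cons hi
        have hget : s.getD i 0 = s[i] := List.getD_eq_getElem s 0 hi
        rw [hdrop, hget]
        by_cases hc : s[i] ∈ taken
        · simp [altScan, hc]
        · by_cases hneg : s[i] < 0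
          · simp [altScan, hc, hneg]
          · by_cases hgt : (99 : Int) < s[i]
            · simp [altScan, hc, hneg, hgt]
            · have hadj := adj_false s d hd hstep i hi
              rw [hget] at hadj
              simp only [List.getD_eq_getElem?_getD] at hadj
              by_cases h9 : PySem.Int.mod s[i] 10 = 9
              · by_cases hlen : i + 1 < s.length
                · have hdrop2 : s.drop (i+1) = s[i+1] :: s.drop (i+2) := List.drop_eq_getElem_cons hlen
                  have hget2 : s.getD (i+1) 0 = s[i+1] := List.getD_eq_getElem s 0 hlen
                  rw [hget2, hdrop2]
                  have h9' : s[i] % 10 = 9 := by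
                    rw [← PySem.Int.mod_eq_emod_of_pos (by norm_num : (0:Int) < 10)]; exact h9
                  by_cases h0 : PySem.Int.mod s[i+1] 10 = 0
                  · have h0' : (10:Int) ∣ s[i+1] := (PySem.Int.mod_eq_zero_iff_dvd _ _).mp h0
                    simp [altScan, wrapNext, hc, hneg, hgt, h9', h0', hlen]
                  · have h0' : ¬ (10:Int) ∣ s[i+1] := fun hdvd => h0 ((PySem.Int.mod_eq_zero_iff_dvd _ _).mpr hdvd)
                    have hrec := ih (i+1) (by omega)
                    rw [hdrop2] at hrec
                    simp [altScan, wrapNext, hc, hneg, hgt, h9', h0', hlen, hadj, hrec]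
                · have h9' : s[i] % 10 = 9 := by
                    rw [← PySem.Int.mod_eq_emod_of_pos (by norm_num : (0:Int) < 10)]; exact h9
                  have hnil : s.drop (i+1) = [] := List.drop_eq_nil_of_le (by omega)
                  have hrec := ih (i+1) (by omega)
                  rw [hnil] at hrec
                  rw [hnil]
                  simp [altScan, wrapNext, hc, hneg, hgt, h9', hlen, hadj, hrec]
              · have h9' : ¬ s[i] % 10 = 9 := by
                  rw [← PySem.Int.mod_eq_emod_of_pos (by norm_num : (0:Int) < 10)]; exact h9
                have hrec := ih (i+1) (by omega)
                simp [altScan, wrapNext, hc, hneg, hgt, h9', hadj, hrec]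
      · rw [cbbLoop, dif_neg hi]
        rw [List.drop_eq_nil_of_le (by omega)]
        simp [altScan]
  intro i
  exact main (s.length - i) i le_rfl

-- once the boat has collapsed to [-1], appending a cell and re-checking keeps [-1]
theorem cbb_head_neg (taken : List Int) (c1 c2 : Int) (hc : c1 < 0) :
    cbbLoop taken [c1, c2] 0 = [-1] := by
  rw [cbbLoop]
  by_cases hcon : c1 ∈ taken
  · simp [hcon]
  · simp [hcon, hc]

theorem absorb (taken : List Int) (x : Int) : check_boatinboard ([-1] ++ [x]) taken = [-1] := by
  unfold check_boatinboard
  simp only [List.singleton_append]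
  rcases lt_trichotomy x (-1) with hx | hx | hx
  · rw [PySem.List.sorted_eq_of_perm_of_pairwise_lt _ [x, -1] (fun x => x)
      (List.Perm.swap (-1) x []) (by simp [hx])]
    exact cbb_head_neg taken x (-1) (by omega)
  · subst hx
    rw [show PySem.List.sorted [(-1 : Int), -1] (fun x => x) false = [-1, -1] from ?_]
    · exact cbb_head_neg taken (-1) (-1) (by omega)
    · have hp := PySem.List.sorted_perm [(-1 : Int), -1] (fun x => x) false
      have h2 : ([(-1 : Int), -1]) = List.replicate 2 (-1) := rfl
      rw [h2] at hp
      exact List.perm_replicate.mp hp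
  · rw [PySem.List.sorted_eq_of_perm_of_pairwise_lt _ [-1, x] (fun x => x)
      (List.Perm.refl _) (by simp [hx])]
    exact cbb_head_neg taken (-1) x (by omega)

-- monotonicity of failure under extending the sorted cell list
theorem altScan_cons_of_true (taken : List Int) (y : Int) (s : List Int)
    (h : altScan taken s = true) : altScan taken (y :: s) = true := by
  rw [altScan]
  split_ifs <;> first | rfl | exact h

theorem altScan_append_of_true (taken : List Int) (x : Int) :
    ∀ s : List Int, altScan taken s = true → altScan taken (s ++ [x]) = true := by
  intro s
  induction s with
  | nil => intro h; simp [altScan] at h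
  | cons c rest ih =>
    intro h
    rw [List.cons_append, altScan]
    rw [altScan] at h
    split_ifs at h with h1 h2
    · rw [if_pos h1]
    · cases rest with
      | nil => simp [wrapNext] at h2
      | cons e t =>
        rw [if_neg h1]
        rw [if_pos (by simpa [wrapNext] using h2)]
    · rw [if_neg h1]
      have := ih h
      split_ifs <;> [rfl; exact this]

-- the sorted cell lists, ascending (st = d) and descending (st = -d) cases
theorem sorted_cells_pos (start d : Int) (hd : 0 < d) (k : Nat) :
    PySem.List.sorted ((List.range k).map (fun (i : Nat) => start + d * (i : Int))) (fun x => x) false =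
      asc start d k :=
  PySem.List.sorted_eq_of_perm_of_pairwise_lt _ _ _ (List.Perm.refl _) (asc_pairwise start d hd k)

theorem desc_eq_reverse (start d : Int) (k : Nat) :
    (List.range k).map (fun (i : Nat) => start + (-d) * (i : Int)) =
      (asc (start - d * ((k:Int) - 1)) d k).reverse := by
  apply List.ext_getElem
  · simp [asc_length]
  · intro j h1 h2
    simp only [List.length_map, List.length_range] at h1
    rw [List.getElem_map, List.getElem_range]
    rw [List.getElem_reverse]
    rw [asc_getElem _ d k _ (by rw [asc_length] at *; omega)]
    rw [asc_length]
    have : ((k - 1 - j : Nat) : Int) = (k : Int) - 1 - j := by omega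
    rw [this]
    ring

theorem sorted_cells_neg (start d : Int) (hd : 0 < d) (k : Nat) :
    PySem.List.sorted ((List.range k).map (fun (i : Nat) => start + (-d) * (i : Int))) (fun x => x) false =
      asc (start - d * ((k:Int) - 1)) d k := by
  apply PySem.List.sorted_eq_of_perm_of_pairwise_lt
  · rw [desc_eq_reverse]
    exact (List.reverse_perm _).symm
  · exact asc_pairwise _ d hd k

-- the two adjacent-step facts cbb_core needs
theorem asc_step (a d : Int) (k : Nat) :
    ∀ j, j + 1 < (asc a d k).length → (asc a d k).getD (j+1) 0 = (asc a d k).getD j 0 + d := by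
  intro j hj
  rw [asc_length] at hj
  exact asc_diff a d k j hj

-- main invariant of A's fold, ascending case (st = d > 0)
theorem aLoop_eq_pos (taken : List Int) (start d : Int) (hd : d = 1 ∨ d = 10) (n : Nat) :
    aLoop taken start d n = if altScan taken (asc start d n) then [-1] else asc start d n := by
  have hd0 : 0 < d := by rcases hd with rfl | rfl <;> norm_num
  induction n with
  | zero => simp [aLoop, asc, altScan]
  | succ k ih =>
    rw [show aLoop taken start d (k+1) =
        check_boatinboard (aLoop taken start d k ++ [start + d * (k : Int)]) taken from by
      unfold aLoop; rw [List.range_succ, List.foldl_append]; rfl]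
    rw [ih]
    by_cases hA : altScan taken (asc start d k) = true
    · rw [if_pos hA, absorb]
      rw [if_pos (by rw [asc_succ_append]; exact altScan_append_of_true taken _ _ hA)]
    · rw [if_neg hA]
      unfold check_boatinboard
      rw [show asc start d k ++ [start + d * (k : Int)] = asc start d (k+1) from
        (asc_succ_append start d k).symm]
      rw [PySem.List.sorted_eq_of_perm_of_pairwise_lt _ _ _ (List.Perm.refl _) (asc_pairwise start d hd0 (k+1))]
      rw [cbb_core taken (asc start d (k+1)) d hd (asc_step start d (k+1)) 0]
      rw [List.drop_zero]

-- main invariant of A's fold, descending case (st = -d < 0)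
theorem aLoop_eq_neg (taken : List Int) (start d : Int) (hd : d = 1 ∨ d = 10) (n : Nat) :
    aLoop taken start (-d) n =
      if altScan taken (asc (start - d * ((n:Int) - 1)) d n) then [-1]
      else asc (start - d * ((n:Int) - 1)) d n := by
  have hd0 : 0 < d := by rcases hd with rfl | rfl <;> norm_num
  induction n with
  | zero => simp [aLoop, asc, altScan]
  | succ k ih =>
    rw [show aLoop taken start (-d) (k+1) =
        check_boatinboard (aLoop taken start (-d) k ++ [start + (-d) * (k : Int)]) taken from by
      unfold aLoop; rw [List.range_succ, List.foldl_append]; rfl]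
    rw [ih]
    have hcons : asc (start - d * (((k:Nat)+1:Int) - 1)) d (k+1) =
        (start + (-d) * (k : Int)) :: asc (start - d * ((k:Int) - 1)) d k := by
      rw [show start - d * (((k:Nat)+1:Int) - 1) = start + (-d) * (k : Int) from by ring]
      rw [asc_succ_cons]
      congr 1
      ring_nf
    by_cases hA : altScan taken (asc (start - d * ((k:Int) - 1)) d k) = true
    · rw [if_pos hA, absorb]
      rw [if_pos (by push_cast at hcons ⊢; rw [hcons]; exact altScan_cons_of_true taken _ _ hA)]
    · rw [if_neg hA]
      unfold check_boatinboard
      rw [PySem.List.sorted_eq_of_perm_of_pairwise_lt _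
        (asc (start - d * (((k:Nat)+1:Int) - 1)) d (k+1)) (fun x => x)
        (by rw [hcons]; exact (List.perm_append_singleton _ _).symm)
        (asc_pairwise _ d hd0 (k+1))]
      rw [cbb_core taken _ d hd (asc_step _ d (k+1)) 0]
      rw [List.drop_zero]
      push_cast
      rfl

-- B's shared tail, written without the let
theorem altGo_eq (boatsize start st : Int) (taken : List Int) :
    altGo boatsize start st taken =
      (if altScan taken (PySem.List.sorted ((List.range boatsize.toNat).map (fun (i : Nat) => start + st * (i : Int))) (fun x => x) false) then [-1]
       else PySem.List.sorted ((List.range boatsize.toNat).map (fun (i : Nat) => start + st * (i : Int))) (fun x => x) false) := rfl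

theorem branch_pos (boatsize start d : Int) (taken : List Int) (hd : d = 1 ∨ d = 10) :
    aLoop taken start d boatsize.toNat = altGo boatsize start d taken := by
  rw [altGo_eq, sorted_cells_pos start d (by rcases hd with rfl | rfl <;> norm_num),
      aLoop_eq_pos taken start d hd]

theorem branch_neg (boatsize start d : Int) (taken : List Int) (hd : d = 1 ∨ d = 10) :
    aLoop taken start (-d) boatsize.toNat = altGo boatsize start (-d) taken := by
  rw [altGo_eq, sorted_cells_neg start d (by rcases hd with rfl | rfl <;> norm_num),
      aLoop_eq_neg taken start d hd]

-- ===== VERDICT (by name: the statement is the Claim_ definition above) =====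
theorem check_boat_spec : Claim_equal_check_boat := by
  intro boatsize start direction taken _
  show check_boat boatsize start direction taken = check_boat_alt boatsize start direction taken
  unfold check_boat check_boat_alt
  split_ifs
  · exact (show ((-10 : Int) = -(10)) from by norm_num) ▸ branch_neg boatsize start 10 taken (Or.inr rfl)
  · exact branch_pos boatsize start 1 taken (Or.inl rfl)
  · exact branch_pos boatsize start 10 taken (Or.inr rfl)
  · exact (show ((-1 : Int) = -(1)) from by norm_num) ▸ branch_neg boatsize start 1 taken (Or.inl rfl)
  · rfl
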